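-- pv_equiv track=rewrite | github.com/estefaniaurdecon-blip/GestionObras | backend-fastapi/app/api/v1/ai_chat.py | _is_adjacent_swap
-- ===== SOURCE A (Python) =====
-- def _is_adjacent_swap(a: str, b: str) -> bool:
--     if len(a) != len(b) or len(a) < 2:
--         return False
--     mismatches = [index for index, (left, right) in enumerate(zip(a, b)) if left != right]
--     if len(mismatches) != 2:
--         return False
--     first, second = mismatches
--     return second == first + 1 and a[first] == b[second] and a[second] == b[first]
-- ===== SOURCE B (Python) =====
-- def _is_adjacent_swap(a: str, b: str) -> bool:
--     if len(a) != len(b) or len(a) < 2: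
--         return False
--     i = 0
--     while i < len(a) and a[i] == b[i]:
--         i += 1
--     if i >= len(a) - 1:
--         return False
--     return a[i] == b[i + 1] and a[i + 1] == b[i] and a[i + 2:] == b[i + 2:]
-- ===== Notes on version B (the rewrite author's own statement) =====
-- stated objective: alternative
-- what changed: B scans to the first divergence and checks a swap of the two characters there plus suffix equality, instead of building the full mismatch-index list over the whole zip and counting it.
import Mathlib
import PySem

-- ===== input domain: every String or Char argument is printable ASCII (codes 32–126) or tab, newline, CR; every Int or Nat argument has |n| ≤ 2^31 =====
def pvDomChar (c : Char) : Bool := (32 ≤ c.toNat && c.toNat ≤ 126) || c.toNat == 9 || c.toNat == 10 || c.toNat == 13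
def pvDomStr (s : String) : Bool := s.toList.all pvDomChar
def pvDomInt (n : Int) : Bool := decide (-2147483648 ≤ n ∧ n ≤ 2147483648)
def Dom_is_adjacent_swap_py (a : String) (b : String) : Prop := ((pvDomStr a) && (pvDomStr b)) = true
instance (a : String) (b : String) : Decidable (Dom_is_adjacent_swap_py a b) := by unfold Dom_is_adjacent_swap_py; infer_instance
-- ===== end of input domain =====

-- B finds the first divergence and checks an adjacent swap there plus suffix equality,
-- instead of A's full mismatch-index list built over the whole zip (alternative decomposition).

-- ===== PORT A =====
def is_adjacent_swap_py (a : String) (b : String) : Bool :=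
  let la := a.toList
  let lb := b.toList
  if la.length ≠ lb.length ∨ la.length < 2 then false
  else
    let mismatches := ((PySem.List.enumerate (la.zip lb) 0).filter (fun p => p.2.1 != p.2.2)).map Prod.fst
    if mismatches.length ≠ 2 then false
    else
      match mismatches with
      | first :: second :: _ =>
          decide (second = first + 1) && (PySem.Str.pyGet? a first == PySem.Str.pyGet? b second)
            && (PySem.Str.pyGet? a second == PySem.Str.pyGet? b first)
      | _ => false

-- ===== PORT B =====
-- the while loop 'i = 0; while i < len(a) and a[i] == b[i]: i += 1' as a structural recursion
def pvFirstDiff : List Char → List Char → Nat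
  | [], [] => 0
  | [], _ :: _ => 0
  | _ :: _, [] => 0
  | x :: xs, y :: ys => if x == y then pvFirstDiff xs ys + 1 else 0

def is_adjacent_swap_py_alt (a : String) (b : String) : Bool :=
  let la := a.toList
  let lb := b.toList
  if la.length ≠ lb.length ∨ la.length < 2 then false
  else
    let i := pvFirstDiff la lb
    if la.length - 1 ≤ i then false
    else
      (PySem.Str.pyGet? a (i : Int) == PySem.Str.pyGet? b ((i : Int) + 1))
        && (PySem.Str.pyGet? a ((i : Int) + 1) == PySem.Str.pyGet? b (i : Int))
        && (PySem.Chars.slice la (some ((i : Int) + 2)) none == PySem.Chars.slice lb (some ((i : Int) + 2)) none)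

-- ===== PRECONDITION & SPEC =====
def Spec_is_adjacent_swap_py (a : String) (b : String) (out : Bool) : Prop := out = is_adjacent_swap_py_alt a b
instance (a : String) (b : String) (out : Bool) : Decidable (Spec_is_adjacent_swap_py a b out) := by unfold Spec_is_adjacent_swap_py; infer_instance

-- ===== CLAIM (what is proved, stated in full; the proofs are below) =====
def Claim_equal_is_adjacent_swap_py : Prop := ∀ (a : String) (b : String), Dom_is_adjacent_swap_py a b → Spec_is_adjacent_swap_py a b (is_adjacent_swap_py a b)

-- ===== LEMMAS AND PROOFS =====

-- A's mismatch-index list, with an explicit enumerate start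
def Ms (s : Int) (xs ys : List Char) : List Int :=
  ((PySem.List.enumerate (xs.zip ys) s).filter (fun p => p.2.1 != p.2.2)).map Prod.fst

-- A's core on lists (after the common length guard)
def aCore (xs ys : List Char) : Bool :=
  let m := Ms 0 xs ys
  if m.length ≠ 2 then false
  else
    match m with
    | f :: s :: _ =>
        decide (s = f + 1) && (PySem.List.pyGet? xs f == PySem.List.pyGet? ys s)
          && (PySem.List.pyGet? xs s == PySem.List.pyGet? ys f)
    | _ => false

-- B's core on lists (after the common length guard)
def bCore (xs ys : List Char) : Bool :=
  let i := pvFirstDiff xs ys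
  if xs.length - 1 ≤ i then false
  else
    (PySem.List.pyGet? xs (i : Int) == PySem.List.pyGet? ys ((i : Int) + 1))
      && (PySem.List.pyGet? xs ((i : Int) + 1) == PySem.List.pyGet? ys (i : Int))
      && (xs.drop (i + 2) == ys.drop (i + 2))

theorem Ms_nil_left (s : Int) (ys : List Char) : Ms s [] ys = [] := by
  simp [Ms]

theorem Ms_cons (s : Int) (x y : Char) (xs ys : List Char) :
    Ms s (x :: xs) (y :: ys) = (if x != y then [s] else []) ++ Ms (s + 1) xs ys := by
  simp only [Ms, List.zip_cons_cons, PySem.List.enumerate_cons, List.filter_cons]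
  by_cases h : x = y <;> simp [h]

theorem Ms_shift (xs : List Char) : ∀ (ys : List Char) (s : Int),
    Ms s xs ys = (Ms 0 xs ys).map (· + s) := by
  induction xs with
  | nil => intro ys s; simp [Ms_nil_left]
  | cons x xs ih =>
    intro ys s
    cases ys with
    | nil => simp [Ms]
    | cons y ys =>
      rw [Ms_cons, Ms_cons, ih ys (s + 1), ih ys (0 + 1), List.map_append, List.map_map]
      by_cases h : x = y <;> simp [h] <;> exact fun _ _ => by omega

theorem Ms_ge (xs : List Char) : ∀ (ys : List Char) (s k : Int), k ∈ Ms s xs ys → s ≤ k := by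
  induction xs with
  | nil => intro ys s k h; simp [Ms_nil_left] at h
  | cons x xs ih =>
    intro ys s k h
    cases ys with
    | nil => simp [Ms] at h
    | cons y ys =>
      rw [Ms_cons] at h
      rcases List.mem_append.mp h with h1 | h2
      · by_cases hxy : x = y
        · simp [hxy] at h1
        · simp [hxy] at h1; omega
      · have := ih ys (s + 1) k h2; omega

theorem Ms_eq_nil_iff (xs : List Char) : ∀ (ys : List Char) (s : Int),
    xs.length = ys.length → (Ms s xs ys = [] ↔ xs = ys) := by
  induction xs with
  | nil =>
    intro ys s hlen
    cases ys with
    | nil => simp [Ms_nil_left]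
    | cons y ys => simp at hlen
  | cons x xs ih =>
    intro ys s hlen
    cases ys with
    | nil => simp at hlen
    | cons y ys =>
      rw [Ms_cons]
      by_cases hxy : x = y
      · simp [hxy, ih ys (s + 1) (by simpa using hlen)]
      · simp [hxy]

theorem pyGet?_shift (x : Char) (xs : List Char) {f : Int} (hf : 0 ≤ f) :
    PySem.List.pyGet? (x :: xs) (f + 1) = PySem.List.pyGet? xs f := by
  have h : f = ((f.toNat : Nat) : Int) := by omega
  rw [h, PySem.List.pyGet?_cons_succ]

theorem aCore_cons_eq (x : Char) (xs ys : List Char) : aCore (x :: xs) (x :: ys) = aCore xs ys := by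
  have hm : Ms 0 (x :: xs) (x :: ys) = (Ms 0 xs ys).map (· + 1) := by
    rw [Ms_cons]
    simpa using (Ms_shift xs ys 1)
  unfold aCore
  rw [hm]
  rcases hm0 : Ms 0 xs ys with _ | ⟨f, _ | ⟨s, rest⟩⟩
  · simp
  · simp
  · by_cases hr : rest = []
    · subst hr
      have hf : (0 : Int) ≤ f := Ms_ge xs ys 0 f (by rw [hm0]; simp)
      have hs : (0 : Int) ≤ s := Ms_ge xs ys 0 s (by rw [hm0]; simp)
      simp only [List.map_cons, List.map_nil, List.length_cons, List.length_nil]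
      rw [pyGet?_shift x xs hf, pyGet?_shift x ys hs, pyGet?_shift x xs hs, pyGet?_shift x ys hf]
      have hd : (s + 1 = f + 1 + 1) ↔ (s = f + 1) := by omega
      simp [hd]
    · simp [hr]

theorem bCore_cons_eq (x : Char) (xs ys : List Char) : bCore (x :: xs) (x :: ys) = bCore xs ys := by
  unfold bCore
  have hi : pvFirstDiff (x :: xs) (x :: ys) = pvFirstDiff xs ys + 1 := by simp [pvFirstDiff]
  rw [hi]
  set i := pvFirstDiff xs ys with hidef
  by_cases hc : xs.length - 1 ≤ i
  · rw [if_pos (by simp; omega), if_pos hc]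
  · rw [if_neg (by simp; omega), if_neg hc]
    have h1 : ((i + 1 : Nat) : Int) = ((i : Nat) : Int) + 1 := by push_cast; ring
    have h2 : PySem.List.pyGet? (x :: xs) ((i + 1 : Nat) : Int) = PySem.List.pyGet? xs (i : Int) := by
      rw [h1, pyGet?_shift x xs (by positivity)]
    have h3 : PySem.List.pyGet? (x :: ys) ((i + 1 : Nat) : Int) = PySem.List.pyGet? ys (i : Int) := by
      rw [h1, pyGet?_shift x ys (by positivity)]
    have h4 : PySem.List.pyGet? (x :: xs) (((i + 1 : Nat) : Int) + 1) = PySem.List.pyGet? xs ((i : Int) + 1) := by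
      rw [h1, pyGet?_shift x xs (by positivity)]
    have h5 : PySem.List.pyGet? (x :: ys) (((i + 1 : Nat) : Int) + 1) = PySem.List.pyGet? ys ((i : Int) + 1) := by
      rw [h1, pyGet?_shift x ys (by positivity)]
    rw [h2, h3, h4, h5]
    have hd : i + 1 + 2 = (i + 2) + 1 := by omega
    rw [hd, List.drop_succ_cons, List.drop_succ_cons]

theorem key_ne (x y : Char) (xs ys : List Char) (hxy : x ≠ y) (hlen : xs.length = ys.length) :
    aCore (x :: xs) (y :: ys) = bCore (x :: xs) (y :: ys) := by
  have hi : pvFirstDiff (x :: xs) (y :: ys) = 0 := by simp [pvFirstDiff, hxy]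
  cases xs with
  | nil =>
    cases ys with
    | nil => simp [aCore, bCore, Ms_cons, Ms_nil_left, hxy, pvFirstDiff]
    | cons v ys' => simp at hlen
  | cons u xs' =>
    cases ys with
    | nil => simp at hlen
    | cons v ys' =>
      have hlen' : xs'.length = ys'.length := by simpa using hlen
      have hB : bCore (x :: u :: xs') (y :: v :: ys') =
          ((x == v) && (u == y) && (xs' == ys')) := by
        unfold bCore
        rw [hi, if_neg (by simp)]
        simp [PySem.List.pyGet?, PySem.List.pyIdx?,
          show (0:Int) ≤ (xs'.length:Int) + 1 by positivity,
          show (0:Int) ≤ (ys'.length:Int) + 1 by positivity]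
      have hm : Ms 0 (x :: u :: xs') (y :: v :: ys') =
          0 :: ((if u != v then [1] else []) ++ Ms 2 xs' ys') := by
        rw [Ms_cons, Ms_cons]
        simp [hxy]
      rw [hB]
      by_cases huv : u = v
      · -- heads after the divergence agree: A has only one mismatch below index 1 shifted ≥ 2
        have hm2 : Ms 0 (x :: u :: xs') (y :: v :: ys') = 0 :: Ms 2 xs' ys' := by
          rw [hm]; simp [huv]
        unfold aCore
        rw [hm2]
        have hfalse : ((x == v) && (u == y) && (xs' == ys')) = false := by
          by_cases h1 : x = v
          · by_cases h2 : u = y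
            · exact absurd (by rw [h1, ← huv, h2] : x = y) hxy
            · simp [h2]
          · simp [h1]
        rw [hfalse]
        rcases h2 : Ms 2 xs' ys' with _ | ⟨k, rest⟩
        · simp
        · cases rest with
          | nil =>
            have hk : (2 : Int) ≤ k := Ms_ge xs' ys' 2 k (by rw [h2]; simp)
            simp
            intro h
            exact absurd h (by omega)
          | cons k2 rest2 => simp
      · -- adjacent mismatch: A's list is 0 :: 1 :: (mismatches of the tails)
        have hm2 : Ms 0 (x :: u :: xs') (y :: v :: ys') = 0 :: 1 :: Ms 2 xs' ys' := by
          rw [hm]; simp [huv]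
        unfold aCore
        rw [hm2]
        rcases h2 : Ms 2 xs' ys' with _ | ⟨k, rest⟩
        · have hxs : xs' = ys' := (Ms_eq_nil_iff xs' ys' 2 hlen').mp h2
          subst hxs
          simp [PySem.List.pyGet?, PySem.List.pyIdx?,
            show (0:Int) ≤ (xs'.length:Int) + 1 by positivity]
        · have hne : xs' ≠ ys' := by
            intro hcontra
            have := (Ms_eq_nil_iff xs' ys' 2 hlen').mpr hcontra
            rw [h2] at this; exact List.cons_ne_nil _ _ this
          simp [hne]

theorem key (xs : List Char) : ∀ (ys : List Char), xs.length = ys.length →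
    aCore xs ys = bCore xs ys := by
  induction xs with
  | nil =>
    intro ys h
    cases ys with
    | nil => rfl
    | cons y ys => simp at h
  | cons x xs ih =>
    intro ys h
    cases ys with
    | nil => simp at h
    | cons y ys =>
      have hlen : xs.length = ys.length := by simpa using h
      by_cases hxy : x = y
      · subst hxy
        rw [aCore_cons_eq, bCore_cons_eq]
        exact ih ys hlen
      · exact key_ne x y xs ys hxy hlen

theorem port_a_eq (a b : String) :
    is_adjacent_swap_py a b =
      if a.toList.length ≠ b.toList.length ∨ a.toList.length < 2 then false
      else aCore a.toList b.toList := rfl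

theorem port_b_eq (a b : String) :
    is_adjacent_swap_py_alt a b =
      if a.toList.length ≠ b.toList.length ∨ a.toList.length < 2 then false
      else bCore a.toList b.toList := by
  unfold is_adjacent_swap_py_alt bCore
  by_cases h : a.toList.length ≠ b.toList.length ∨ a.toList.length < 2
  · rw [if_pos h, if_pos h]
  · rw [if_neg h, if_neg h]
    have hs : ∀ (xs : List Char) (i : Nat),
        PySem.Chars.slice xs (some ((i : Int) + 2)) none = xs.drop (i + 2) := by
      intro xs i
      have hc : ((i : Int) + 2) = (((i + 2 : Nat) : Nat) : Int) := by push_cast; ring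
      rw [hc]
      exact PySem.List.slice_from_natCast xs (i + 2)
    simp only [PySem.Str.pyGet?, PySem.Chars.pyGet?, hs]

-- ===== VERDICT (by name: the statement is the Claim_ definition above) =====
theorem is_adjacent_swap_py_spec : Claim_equal_is_adjacent_swap_py := by
  intro a b _
  unfold Spec_is_adjacent_swap_py
  rw [port_a_eq, port_b_eq]
  by_cases h : a.toList.length ≠ b.toList.length ∨ a.toList.length < 2
  · rw [if_pos h, if_pos h]
  · rw [if_neg h, if_neg h]
    push Not at h
    exact key _ _ h.1
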